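-- pv_equiv track=rewrite | github.com/aryanputta/cachepilot | src/cachepilot/tokenizer.py | _chars_per_token
-- ===== SOURCE A (Python) =====
-- def _chars_per_token(segment: str) -> int:
--     if not segment:
--         return 1
--     if any(not ch.isascii() for ch in segment):
--         return 2
--     if segment.isdigit():
--         return 3
--     if any(ch.isdigit() for ch in segment) and any(ch.isalpha() for ch in segment):
--         return 3
--     if any(ch.isupper() for ch in segment) and any(ch.islower() for ch in segment):
--         return 4
--     return 5
-- ===== SOURCE B (Python) =====
-- def _chars_per_token(segment: str) -> int:
--     if not segment:
--         return 1
--     has_non_ascii = has_digit = has_alpha = has_upper = has_lower = False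
--     all_digit = True
--     for ch in segment:
--         if not ch.isascii():
--             has_non_ascii = True
--         if ch.isdigit():
--             has_digit = True
--         else:
--             all_digit = False
--         if ch.isalpha():
--             has_alpha = True
--         if ch.isupper():
--             has_upper = True
--         if ch.islower():
--             has_lower = True
--     if has_non_ascii:
--         return 2
--     if all_digit:
--         return 3
--     if has_digit and has_alpha:
--         return 3
--     if has_upper and has_lower:
--         return 4
--     return 5
-- ===== Notes on version B (the rewrite author's own statement) =====
-- stated objective: alternative
-- what changed: Replaced six independent any()/isdigit() scans with one pass that accumulates all six boolean flags, then applies the same priority cascade.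
import Mathlib
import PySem

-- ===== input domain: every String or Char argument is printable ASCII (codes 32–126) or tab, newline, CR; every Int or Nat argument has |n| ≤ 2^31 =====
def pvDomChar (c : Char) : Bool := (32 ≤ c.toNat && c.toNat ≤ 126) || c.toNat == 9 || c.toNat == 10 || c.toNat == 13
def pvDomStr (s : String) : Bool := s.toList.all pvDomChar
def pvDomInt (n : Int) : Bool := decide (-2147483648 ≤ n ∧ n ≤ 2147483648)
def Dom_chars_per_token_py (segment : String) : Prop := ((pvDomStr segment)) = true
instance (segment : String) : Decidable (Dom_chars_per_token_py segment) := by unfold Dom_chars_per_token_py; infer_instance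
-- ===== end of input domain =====

-- B merges A's six independent scans into a single pass accumulating boolean flags; same cascade.

-- ===== PORT A =====
def chars_per_token_py (segment : String) : Int :=
  let cs := segment.toList
  if cs = [] then 1
  else if cs.any (fun ch => !(decide (ch.toNat ≤ 127))) then 2
  else if PySem.Chars.strIsdigit cs then 3
  else if cs.any PySem.Chars.isdigit && cs.any PySem.Chars.isalpha then 3
  else if cs.any PySem.Chars.isupper && cs.any PySem.Chars.islower then 4
  else 5

-- ===== PORT B =====
-- state: (has_non_ascii, has_digit, has_alpha, has_upper, has_lower, all_digit)
def cptFlags (cs : List Char) (s : Bool × Bool × Bool × Bool × Bool × Bool) :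
    Bool × Bool × Bool × Bool × Bool × Bool :=
  cs.foldl (fun st ch =>
    ((st.1 || !(decide (ch.toNat ≤ 127))),
     (st.2.1 || PySem.Chars.isdigit ch),
     (st.2.2.1 || PySem.Chars.isalpha ch),
     (st.2.2.2.1 || PySem.Chars.isupper ch),
     (st.2.2.2.2.1 || PySem.Chars.islower ch),
     (st.2.2.2.2.2 && PySem.Chars.isdigit ch))) s

def chars_per_token_py_alt (segment : String) : Int :=
  let cs := segment.toList
  if cs = [] then 1
  else
    let f := cptFlags cs (false, false, false, false, false, true)
    if f.1 then 2
    else if f.2.2.2.2.2 then 3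
    else if f.2.1 && f.2.2.1 then 3
    else if f.2.2.2.1 && f.2.2.2.2.1 then 4
    else 5

-- ===== PRECONDITION & SPEC =====
def Spec_chars_per_token_py (segment : String) (out : Int) : Prop := out = chars_per_token_py_alt segment
instance (segment : String) (out : Int) : Decidable (Spec_chars_per_token_py segment out) := by unfold Spec_chars_per_token_py; infer_instance

-- ===== CLAIM (what is proved, stated in full; the proofs are below) =====
def Claim_equal_chars_per_token_py : Prop := ∀ (segment : String), Dom_chars_per_token_py segment → Spec_chars_per_token_py segment (chars_per_token_py segment)

-- ===== LEMMAS AND PROOFS =====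
theorem cptFlags_eq (cs : List Char) (s : Bool × Bool × Bool × Bool × Bool × Bool) :
    cptFlags cs s =
      ((s.1 || cs.any (fun ch => !(decide (ch.toNat ≤ 127)))),
       (s.2.1 || cs.any PySem.Chars.isdigit),
       (s.2.2.1 || cs.any PySem.Chars.isalpha),
       (s.2.2.2.1 || cs.any PySem.Chars.isupper),
       (s.2.2.2.2.1 || cs.any PySem.Chars.islower),
       (s.2.2.2.2.2 && cs.all PySem.Chars.isdigit)) := by
  induction cs generalizing s with
  | nil => simp [cptFlags]
  | cons c cs ih =>
    simp only [cptFlags, List.foldl_cons] at *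
    rw [ih]
    simp [Bool.or_assoc, Bool.and_assoc]

theorem chars_per_token_py_spec : Claim_equal_chars_per_token_py := by
  intro segment _
  unfold Spec_chars_per_token_py chars_per_token_py chars_per_token_py_alt
  simp only [cptFlags_eq, Bool.false_or, Bool.true_and]
  by_cases h : segment.toList = []
  · simp [h]
  · simp only [h, if_false]
    have : PySem.Chars.strIsdigit segment.toList = List.all segment.toList PySem.Chars.isdigit := by
      simp [PySem.Chars.strIsdigit, h]
    rw [this]
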